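-- pv_equiv track=rewrite | github.com/py-in-the-sky/challenges | codility/prefix_set.py | solution
-- ===== SOURCE A (Python) =====
-- def solution(A):
--     distinct1 = set(A)
--     distinct2 = set()
--     prefix_idx = -1
--
--     while len(distinct2) < len(distinct1):
--         prefix_idx += 1
--         distinct2.add(A[prefix_idx])
--
--     return prefix_idx
-- ===== SOURCE B (Python) =====
-- def solution(A):
--     first_index = {}
--     for i, v in enumerate(A):
--         if v not in first_index:
--             first_index[v] = i
--     return max(first_index.values(), default=-1)
-- ===== Notes on version B (the rewrite author's own statement) =====
-- stated objective: alternative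
-- what changed: Replaces the two-set size-comparison while loop (grow a prefix set until it matches set(A)) with a single enumerate pass recording each value's first-occurrence index in a dict, returning the max of those indices (default -1).
import Mathlib
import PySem

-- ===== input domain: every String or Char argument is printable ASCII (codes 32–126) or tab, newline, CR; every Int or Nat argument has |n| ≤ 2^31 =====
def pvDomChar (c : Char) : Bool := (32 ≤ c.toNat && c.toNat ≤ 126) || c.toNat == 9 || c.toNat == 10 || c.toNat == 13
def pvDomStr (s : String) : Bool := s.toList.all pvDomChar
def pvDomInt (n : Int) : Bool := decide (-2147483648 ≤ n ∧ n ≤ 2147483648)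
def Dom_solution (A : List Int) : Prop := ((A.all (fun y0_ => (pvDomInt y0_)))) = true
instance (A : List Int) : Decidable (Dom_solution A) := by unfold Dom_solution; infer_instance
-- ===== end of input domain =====

-- B replaces A's grow-a-prefix-set-until-it-equals-set(A) loop by a first-occurrence
-- dict built in one enumerate pass plus a max reduction (alternative decomposition, same cost).

-- ===== PORT A =====
-- fuel bounds the iteration count (each pass adds one new element of set(A), so
-- |set(A)| ≤ |A| passes happen); the 0-fuel and index-out-of-range branches are unreachable.
def solutionLoop (A : List Int) (distinct1 distinct2 : PySem.Set Int) (prefixIdx : Int) : Nat → Int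
  | 0 => prefixIdx
  | fuel+1 =>
    if PySem.Set.len distinct2 < PySem.Set.len distinct1 then
      match PySem.List.pyGet? A (prefixIdx + 1) with
      | some v => solutionLoop A distinct1 (PySem.Set.add distinct2 v) (prefixIdx + 1) fuel
      | none => prefixIdx + 1  -- unreachable (the loop stops before the index leaves range)
    else prefixIdx

def solution (A : List Int) : Int :=
  solutionLoop A (PySem.Set.ofList A) PySem.Set.empty (-1) A.length

-- ===== PORT B =====
def solution_alt (A : List Int) : Int :=
  let firstIndex : PySem.Dict Int Int :=
    (PySem.List.enumerate A).foldl
      (fun d p => if d.contains p.2 then d else d.insert p.2 p.1) PySem.Dict.empty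
  PySem.List.maxD firstIndex.values (fun x => x) (-1)

-- ===== PRECONDITION & SPEC =====
def Spec_solution (A : List Int) (out : Int) : Prop := out = solution_alt A
instance (A : List Int) (out : Int) : Decidable (Spec_solution A out) := by unfold Spec_solution; infer_instance

-- ===== CLAIM (what is proved, stated in full; the proofs are below) =====
def Claim_equal_solution : Prop := ∀ (A : List Int), Dom_solution A → Spec_solution A (solution A)

-- ===== LEMMAS AND PROOFS =====

-- `stop A` = the least k with |set(A[:k])| = |set(A)|; both programs return (stop A) - 1.
theorem stopEx (A : List Int) :
    ∃ k, (PySem.Set.ofList (A.take k)).length = (PySem.Set.ofList A).length :=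
  ⟨A.length, by simp⟩

def stop (A : List Int) : Nat := Nat.find (stopEx A)

theorem len_ofList_take_le (A : List Int) (k : Nat) :
    (PySem.Set.ofList (A.take k)).length ≤ (PySem.Set.ofList A).length := by
  apply List.Subperm.length_le
  apply List.Nodup.subperm (PySem.Set.nodup_ofList _)
  intro x hx
  rw [PySem.Set.mem_ofList] at hx ⊢
  exact List.mem_of_mem_take hx

theorem stop_spec (A : List Int) :
    (PySem.Set.ofList (A.take (stop A))).length = (PySem.Set.ofList A).length :=
  Nat.find_spec (stopEx A)

theorem stop_le_len (A : List Int) : stop A ≤ A.length :=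
  Nat.find_le (by simp)

theorem stop_min (A : List Int) {k : Nat} (h : k < stop A) :
    (PySem.Set.ofList (A.take k)).length < (PySem.Set.ofList A).length :=
  lt_of_le_of_ne (len_ofList_take_le A k) (Nat.find_min (stopEx A) h)

theorem stop_le_of_eq (A : List Int) {k : Nat}
    (h : (PySem.Set.ofList (A.take k)).length = (PySem.Set.ofList A).length) :
    stop A ≤ k :=
  Nat.find_min' (stopEx A) h

theorem mem_take_stop (A : List Int) {v : Int} (hv : v ∈ A) : v ∈ A.take (stop A) := by
  have hsub : List.Subperm (PySem.Set.ofList (A.take (stop A))) (PySem.Set.ofList A) := by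
    apply List.Nodup.subperm (PySem.Set.nodup_ofList _)
    intro x hx
    rw [PySem.Set.mem_ofList] at hx ⊢
    exact List.mem_of_mem_take hx
  have hperm : List.Perm (PySem.Set.ofList (A.take (stop A))) (PySem.Set.ofList A) :=
    hsub.perm_of_length_le (le_of_eq (stop_spec A).symm)
  have : v ∈ PySem.Set.ofList (A.take (stop A)) :=
    hperm.mem_iff.mpr ((PySem.Set.mem_ofList _ _).mpr hv)
  exact (PySem.Set.mem_ofList _ _).mp this

theorem idxOf_lt_stop (A : List Int) {v : Int} (hv : v ∈ A) : A.idxOf v < stop A := by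
  have hmem : v ∈ A.take (stop A) := mem_take_stop A hv
  have h1 : A.idxOf v = (A.take (stop A)).idxOf v := by
    conv_lhs => rw [← List.take_append_drop (stop A) A]
    exact List.idxOf_append_of_mem hmem
  rw [h1]
  calc (A.take (stop A)).idxOf v < (A.take (stop A)).length :=
        List.idxOf_lt_length_of_mem hmem
    _ ≤ stop A := by simp

-- at index stop-1 a new value appears (A nonempty)
theorem stop_pos (A : List Int) (hA : A ≠ []) : 0 < stop A := by
  rcases Nat.eq_zero_or_pos (stop A) with h | h
  · exfalso
    have hspec := stop_spec A
    rw [h] at hspec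
    simp [PySem.Set.ofList_nil] at hspec
    rcases List.exists_mem_of_ne_nil A hA with ⟨x, hx⟩
    have hx' : x ∈ PySem.Set.ofList A := (PySem.Set.mem_ofList _ _).mpr hx
    have : 0 < (PySem.Set.ofList A).length := List.length_pos_of_mem hx'
    omega
  · exact h

theorem new_at_stop (A : List Int) (hA : A ≠ []) :
    ∃ v ∈ A, A.idxOf v = stop A - 1 := by
  have hpos := stop_pos A hA
  have hlen : 0 < A.length := List.length_pos_of_ne_nil hA
  have hsle := stop_le_len A
  have hlt : stop A - 1 < A.length := by omega
  obtain ⟨x, hx⟩ : ∃ x, A[stop A - 1]'hlt = x := ⟨_, rfl⟩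
  refine ⟨x, hx ▸ List.getElem_mem hlt, ?_⟩
  have hnotmem : x ∉ A.take (stop A - 1) := by
    intro hmem
    -- then set(A[:stop]) = set(A[:stop-1]) contradicting minimality
    have htake : A.take (stop A) = (A.take (stop A - 1)).concat x := by
      rw [← hx, List.take_concat_get hlt]
      congr 1
      omega
    have hsets : PySem.Set.ofList (A.take (stop A)) =
        PySem.Set.ofList (A.take (stop A - 1)) := by
      rw [htake, List.concat_eq_append, PySem.Set.ofList_append_singleton,
        PySem.Set.add_of_mem ((PySem.Set.mem_ofList _ _).mpr hmem)]
    have hlt' := stop_min A (k := stop A - 1) (by omega)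
    rw [← hsets, stop_spec A] at hlt'
    omega
  have hsplit : A = A.take (stop A - 1) ++ (x :: A.drop (stop A)) := by
    conv_lhs => rw [← List.take_append_drop (stop A - 1) A]
    congr 1
    have h1 : stop A - 1 + 1 = stop A := by omega
    rw [List.drop_eq_getElem_cons hlt, hx, h1]
  conv_lhs => rw [hsplit]
  rw [List.idxOf_append_of_notMem hnotmem, List.idxOf_cons_self]
  simp
  omega

-- ===== A-side: the loop returns stop A - 1 =====
theorem loop_eq (A : List Int) :
    ∀ (fuel k : Nat), k ≤ stop A → stop A ≤ k + fuel →
      solutionLoop A (PySem.Set.ofList A) (PySem.Set.ofList (A.take k))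
        ((k : Int) - 1) fuel = (stop A : Int) - 1 := by
  intro fuel
  induction fuel with
  | zero =>
    intro k h1 h2
    have : k = stop A := by omega
    simp [solutionLoop, this]
  | succ fuel ih =>
    intro k h1 h2
    by_cases hlt : (PySem.Set.ofList (A.take k)).length < (PySem.Set.ofList A).length
    · have hkstop : k < stop A := by
        rcases lt_or_eq_of_le h1 with h | h
        · exact h
        · exfalso; rw [h, stop_spec A] at hlt; omega
      have hklen : k < A.length := lt_of_lt_of_le hkstop (stop_le_len A)
      have hget : PySem.List.pyGet? A ((k : Int) - 1 + 1) = some A[k] := by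
        have : (k : Int) - 1 + 1 = (k : Nat) := by omega
        rw [this, PySem.List.pyGet?_natCast]
        simp [hklen]
      have hcond : PySem.Set.len (PySem.Set.ofList (A.take k)) <
          PySem.Set.len (PySem.Set.ofList A) := by
        simp only [PySem.Set.len]
        exact_mod_cast hlt
      have hnext : PySem.Set.add (PySem.Set.ofList (A.take k)) A[k] =
          PySem.Set.ofList (A.take (k + 1)) := by
        rw [← List.take_concat_get hklen, List.concat_eq_append,
          PySem.Set.ofList_append_singleton]
      rw [solutionLoop, if_pos (by exact_mod_cast hcond), hget]
      simp only
      rw [hnext]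
      have : (k : Int) - 1 + 1 = ((k + 1 : Nat) : Int) - 1 := by push_cast; omega
      rw [this]
      exact ih (k + 1) (by omega) (by omega)
    · have heq : (PySem.Set.ofList (A.take k)).length =
          (PySem.Set.ofList A).length :=
        le_antisymm (len_ofList_take_le A k) (by omega)
      have : k = stop A := le_antisymm h1 (stop_le_of_eq A heq)
      rw [solutionLoop, if_neg]
      · rw [this]
      · simp only [PySem.Set.len]
        intro hc
        have : (PySem.Set.ofList (A.take k)).length <
            (PySem.Set.ofList A).length := by exact_mod_cast hc
        omega

theorem solution_eq_stop (A : List Int) : solution A = (stop A : Int) - 1 := by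
  have h0 : PySem.Set.empty = PySem.Set.ofList (A.take 0) := by
    simp [PySem.Set.empty, PySem.Set.ofList_nil]
  have h1 : (-1 : Int) = ((0 : Nat) : Int) - 1 := by norm_num
  rw [solution, h1, h0]
  exact loop_eq A A.length 0 (Nat.zero_le _) (by simpa using stop_le_len A)

-- ===== B-side: the dict holds first-occurrence indices =====
def bStep (d : PySem.Dict Int Int) (p : Int × Int) : PySem.Dict Int Int :=
  if d.contains p.2 then d else d.insert p.2 p.1

theorem bStep_keys_nodup (l : List (Int × Int)) :
    ∀ d : PySem.Dict Int Int, d.keys.Nodup → (l.foldl bStep d).keys.Nodup := by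
  induction l with
  | nil => intro d hd; simpa using hd
  | cons p rest ih =>
    intro d hd
    rw [List.foldl_cons]
    apply ih
    unfold bStep
    split
    · exact hd
    · exact PySem.Dict.nodup_keys_insert _ _ _ hd

theorem get?_fold (A : List Int) :
    ∀ (s : Int) (d : PySem.Dict Int Int) (v : Int),
      ((PySem.List.enumerate A s).foldl bStep d).get? v =
        if d.contains v then d.get? v
        else if v ∈ A then some (s + (A.idxOf v : Int)) else none := by
  induction A with
  | nil =>
    intro s d v
    simp only [PySem.List.enumerate_nil, List.foldl_nil, List.not_mem_nil, if_false]
    by_cases h : d.contains v = true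
    · rw [if_pos h]
    · rw [if_neg h]
      exact (PySem.Dict.get?_eq_none_iff_contains _ _).mpr (by simpa using h)
  | cons x xs ih =>
    intro s d v
    rw [PySem.List.enumerate_cons, List.foldl_cons, ih]
    by_cases hdx : d.contains x = true
    · have hstep : bStep d (s, x) = d := by simp [bStep, hdx]
      rw [hstep]
      by_cases hdv : d.contains v = true
      · rw [if_pos hdv, if_pos hdv]
      · rw [if_neg hdv, if_neg hdv]
        by_cases hvx : v = x
        · subst hvx; exact absurd hdx hdv
        · simp only [List.mem_cons, hvx, false_or]
          by_cases hvxs : v ∈ xs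
          · rw [if_pos hvxs, if_pos hvxs,
              List.idxOf_cons_ne _ (Ne.symm hvx)]
            push_cast [Nat.succ_eq_add_one]
            ring_nf
          · rw [if_neg hvxs, if_neg hvxs]
    · have hstep : bStep d (s, x) = d.insert x s := by simp [bStep, hdx]
      rw [hstep]
      by_cases hvx : v = x
      · subst hvx
        rw [if_pos (PySem.Dict.contains_insert_self _ _ _), if_neg hdx,
          PySem.Dict.get?_insert_self]
        simp [List.idxOf_cons_self]
      · rw [PySem.Dict.get?_insert_of_ne d s hvx]
        have hc : (d.insert x s).contains v = d.contains v := by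
          rw [PySem.Dict.contains_insert]
          simp [show (v == x) = false from by simp [hvx]]
        rw [hc]
        by_cases hdv : d.contains v = true
        · rw [if_pos hdv, if_pos hdv]
        · rw [if_neg hdv, if_neg hdv]
          simp only [List.mem_cons, hvx, false_or]
          by_cases hvxs : v ∈ xs
          · rw [if_pos hvxs, if_pos hvxs,
              List.idxOf_cons_ne _ (Ne.symm hvx)]
            push_cast [Nat.succ_eq_add_one]
            ring_nf
          · rw [if_neg hvxs, if_neg hvxs]

theorem mem_values_iff (A : List Int) (i : Int) :
    i ∈ ((PySem.List.enumerate A).foldl bStep PySem.Dict.empty).values ↔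
      ∃ v ∈ A, i = (A.idxOf v : Int) := by
  have hnodup : ((PySem.List.enumerate A).foldl bStep PySem.Dict.empty).keys.Nodup :=
    bStep_keys_nodup _ _ (by simp)
  constructor
  · intro hi
    simp only [PySem.Dict.values, List.mem_map] at hi
    obtain ⟨⟨v, j⟩, hp, hj⟩ := hi
    have hsome := (PySem.Dict.get?_eq_some_iff_mem_items _ v j hnodup).mpr hp
    rw [get?_fold A 0 PySem.Dict.empty v] at hsome
    by_cases hv : v ∈ A
    · simp [hv] at hsome
      exact ⟨v, hv, by simp [← hj, ← hsome]⟩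
    · simp [hv] at hsome
  · rintro ⟨v, hv, rfl⟩
    have hget : ((PySem.List.enumerate A).foldl bStep PySem.Dict.empty).get? v =
        some ((A.idxOf v : Int)) := by
      rw [get?_fold A 0 PySem.Dict.empty v]
      simp [hv]
    have := (PySem.Dict.get?_eq_some_iff_mem_items _ v _ hnodup).mp hget
    simp only [PySem.Dict.values, List.mem_map]
    exact ⟨(v, (A.idxOf v : Int)), this, rfl⟩

theorem solution_alt_eq_stop (A : List Int) : solution_alt A = (stop A : Int) - 1 := by
  unfold solution_alt
  simp only []
  by_cases hA : A = []
  · subst hA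
    have hstop : stop ([] : List Int) = 0 := Nat.le_zero.mp (stop_le_of_eq _ (by simp))
    simp [PySem.List.enumerate_nil, PySem.List.maxD, PySem.Dict.values,
      PySem.Dict.empty, PySem.List.max?, hstop]
  · set vals := ((PySem.List.enumerate A).foldl bStep PySem.Dict.empty).values with hvals
    have hvals' : ((PySem.List.enumerate A).foldl
        (fun d p => if d.contains p.2 then d else d.insert p.2 p.1)
        PySem.Dict.empty).values = vals := rfl
    rw [hvals']
    have hmem : ((stop A : Int) - 1) ∈ vals := by
      rw [hvals, mem_values_iff]
      obtain ⟨v, hv, hidx⟩ := new_at_stop A hA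
      refine ⟨v, hv, ?_⟩
      rw [hidx]
      have := stop_pos A hA
      omega
    have hub : ∀ i ∈ vals, i ≤ (stop A : Int) - 1 := by
      intro i hi
      rw [hvals, mem_values_iff] at hi
      obtain ⟨v, hv, rfl⟩ := hi
      have := idxOf_lt_stop A hv
      omega
    have hne : vals ≠ [] := fun h => by simp [h] at hmem
    unfold PySem.List.maxD
    rcases hmax : PySem.List.max? vals (fun x => x) with _ | m
    · exact absurd ((PySem.List.max?_eq_none_iff _ _).mp hmax) hne
    · have hm : m ∈ vals := PySem.List.max?_mem hmax
      have h1 : m ≤ (stop A : Int) - 1 := hub m hm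
      have h2 : (stop A : Int) - 1 ≤ m := PySem.List.max?_isMax hmax _ hmem
      simp only [Option.getD_some]
      omega

-- ===== VERDICT (by name: the statement is the Claim_ definition above) =====
theorem solution_spec : Claim_equal_solution := by
  intro A _
  unfold Spec_solution
  rw [solution_eq_stop, solution_alt_eq_stop]
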